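-- pv_equiv track=rewrite | github.com/pratyushKumar1382/NTRU-Quantum-Safe-Cryptosystem- | utils.py | encoded_array_to_string
-- ===== SOURCE A (Python) =====
-- def encoded_array_to_string(encoded_array):
--     decoded_string = ""
--     current_byte = ""
--     for num in encoded_array:
--         if num == -1:
--             if current_byte:
--                 # Convert binary string to ASCII character
--                 ascii_value = int(current_byte, 2)
--                 decoded_string += chr(ascii_value)
--                 current_byte = ""
--         else:
--             current_byte += str(num)
--     # Handle any remaining byte (in case there's no trailing -1)
--     if current_byte:
--         ascii_value = int(current_byte, 2)
--         decoded_string += chr(ascii_value)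
--     return decoded_string
-- ===== SOURCE B (Python) =====
-- def encoded_array_to_string(encoded_array):
--     # Run-based segmentation: scan each maximal run of non-delimiter digits as a
--     # whole, convert it to one character, instead of A's per-element flush state machine.
--     chars = []
--     i, n = 0, len(encoded_array)
--     while i < n:
--         if encoded_array[i] == -1:
--             i += 1
--         else:
--             j = i
--             bits = ''
--             while j < n and encoded_array[j] != -1:
--                 bits += str(encoded_array[j])
--                 j += 1
--             chars.append(chr(int(bits, 2)))
--             i = j
--     return ''.join(chars)
-- ===== Notes on version B (the rewrite author's own statement) =====
-- stated objective: alternative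
-- what changed: Replaces A's per-element accumulate-and-flush state machine (current_byte built up and flushed at each -1) with run-based segmentation: an outer loop that skips delimiters or scans a whole maximal run of digits and converts it to one character.
import Mathlib
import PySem

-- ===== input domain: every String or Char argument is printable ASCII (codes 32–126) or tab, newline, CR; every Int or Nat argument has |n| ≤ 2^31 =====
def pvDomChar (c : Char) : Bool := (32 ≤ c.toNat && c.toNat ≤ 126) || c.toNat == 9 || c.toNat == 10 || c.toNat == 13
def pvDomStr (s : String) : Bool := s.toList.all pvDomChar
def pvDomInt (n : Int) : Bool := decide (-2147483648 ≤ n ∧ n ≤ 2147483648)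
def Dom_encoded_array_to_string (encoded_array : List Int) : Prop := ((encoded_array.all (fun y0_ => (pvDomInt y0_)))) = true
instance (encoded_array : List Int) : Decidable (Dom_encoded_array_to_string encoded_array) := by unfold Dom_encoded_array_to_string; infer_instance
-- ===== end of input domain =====

-- B replaces A's per-element accumulate-and-flush state machine by run-based segmentation
-- (scan each maximal run of digits between -1 delimiters and convert it whole); objective: alternative decomposition, same cost.

-- ===== PORT A =====
-- chr(int(bits, 2)); exact on Pre_: bits are '0'/'1' chars and the decoded value is a
-- valid Unicode scalar, so int(...,2) returns and Char.ofNat is exactly Python's chr.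
def pvChr (bits : List Char) : Char :=
  Char.ofNat ((PySem.Int.ofCharsBase? bits 2).getD 0).toNat

-- the loop body of A: state = (decoded_string, current_byte) as char lists
def pvStepA (st : List Char × List Char) (num : Int) : List Char × List Char :=
  if num = -1 then
    if st.2 ≠ [] then (st.1 ++ [pvChr st.2], []) else st
  else
    (st.1, st.2 ++ PySem.Int.toChars num)

-- A's trailing flush of current_byte
def pvFinishA (st : List Char × List Char) : List Char :=
  if st.2 ≠ [] then st.1 ++ [pvChr st.2] else st.1

def encoded_array_to_string (encoded_array : List Int) : String :=
  String.ofList (pvFinishA (encoded_array.foldl pvStepA ([], [])))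

-- ===== PORT B =====
-- Source B's outer while loop: skip a delimiter, or scan the whole maximal run of
-- non-delimiter elements (the inner `while j < n and encoded_array[j] != -1` scan
-- = takeWhile/dropWhile) and emit its character.
def pvAltGo (l : List Int) : List Char :=
  match l with
  | [] => []
  | x :: t =>
    if _hx : x = -1 then pvAltGo t
    else
      pvChr (((x :: t).takeWhile (fun y => y ≠ -1)).flatMap PySem.Int.toChars)
        :: pvAltGo ((x :: t).dropWhile (fun y => y ≠ -1))
termination_by l.length
decreasing_by
  · simp
  · have h1 : (List.dropWhile (fun y => decide (y ≠ -1)) t).length ≤ t.length :=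
      List.length_dropWhile_le _ t
    simp only [List.dropWhile_cons, decide_eq_true_eq]
    rw [if_pos _hx]
    simpa using Nat.lt_succ_of_le h1

def encoded_array_to_string_alt (encoded_array : List Int) : String :=
  String.ofList (PySem.Chars.join [] ((pvAltGo encoded_array).map (fun c => [c])))

-- ===== PRECONDITION & SPEC =====
-- int(bits, 2) of the maximal run of non-delimiter digits starting the list (used by Pre_ only)
def pvRunVal (l : List Int) : Int :=
  (PySem.Int.ofCharsBase? ((l.takeWhile (fun y => y ≠ -1)).flatMap PySem.Int.toChars) 2).getD 0

-- Pre_ excludes only inputs on which Python A raises or whose value leaves the portable type: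
-- elements that are not -1 and whose str() is not all '0'/'1' digits (int(...,2) raises
-- ValueError there), maximal runs decoding above 0x10FFFF (chr raises ValueError), and
-- maximal runs decoding to 0xD800–0xDFFF, where chr returns a lone-surrogate string that
-- is not a value of the Lean String type.
def Pre_encoded_array_to_string (encoded_array : List Int) : Prop :=
  (∀ x ∈ encoded_array, x = -1 ∨ (0 ≤ x ∧ (PySem.Int.toChars x).all (fun c => c == '0' || c == '1') = true)) ∧
  ∀ i ∈ List.range encoded_array.length,
    ((i = 0 ∨ encoded_array.getD (i - 1) 0 = -1) ∧ encoded_array.getD i 0 ≠ -1) →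
      (pvRunVal (encoded_array.drop i) < 0xD800 ∨
       (0xE000 ≤ pvRunVal (encoded_array.drop i) ∧ pvRunVal (encoded_array.drop i) ≤ 0x10FFFF))

instance (encoded_array : List Int) : Decidable (Pre_encoded_array_to_string encoded_array) := by
  unfold Pre_encoded_array_to_string; infer_instance

-- "Hi": 1001000 | 1101001
def pvWitness_encoded_array_to_string : List Int :=
  [1, 0, 0, 1, 0, 0, 0, -1, 1, 1, 0, 1, 0, 0, 1]

def Spec_encoded_array_to_string (encoded_array : List Int) (out : String) : Prop :=
  out = encoded_array_to_string_alt encoded_array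
instance (encoded_array : List Int) (out : String) : Decidable (Spec_encoded_array_to_string encoded_array out) := by
  unfold Spec_encoded_array_to_string; infer_instance

-- ===== CLAIM (what is proved, stated in full; the proofs are below) =====
def Claim_equal_encoded_array_to_string : Prop := ∀ (encoded_array : List Int), Dom_encoded_array_to_string encoded_array → Pre_encoded_array_to_string encoded_array → Spec_encoded_array_to_string encoded_array (encoded_array_to_string encoded_array)

-- ===== LEMMAS AND PROOFS =====

theorem pv_toChars_ne_nil (n : Int) : PySem.Int.toChars n ≠ [] := by
  unfold PySem.Int.toChars
  split
  · simp
  · have := Nat.length_toDigits_pos (b := 10) (n := n.toNat)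
    intro h; simp [h] at this

-- the decoded_string component is only ever appended to
theorem pv_stepA_shift (d0 : List Char) (st : List Char × List Char) (num : Int) :
    pvStepA (d0 ++ st.1, st.2) num = (d0 ++ (pvStepA st num).1, (pvStepA st num).2) := by
  unfold pvStepA
  split_ifs with h1 h2 <;> simp

theorem pv_foldl_shift (l : List Int) (d0 : List Char) (st : List Char × List Char) :
    l.foldl pvStepA (d0 ++ st.1, st.2) =
      (d0 ++ (l.foldl pvStepA st).1, (l.foldl pvStepA st).2) := by
  induction l generalizing st with
  | nil => simp
  | cons n t ih =>
    simp only [List.foldl_cons, pv_stepA_shift d0 st n]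
    exact ih (pvStepA st n)

theorem pv_finishA_shift (d0 : List Char) (st : List Char × List Char) :
    pvFinishA (d0 ++ st.1, st.2) = d0 ++ pvFinishA st := by
  unfold pvFinishA; split_ifs <;> simp

-- a run of non-delimiters only accumulates its digit chars onto current_byte
theorem pv_foldl_run (run : List Int) (d c : List Char) (h : ∀ y ∈ run, y ≠ -1) :
    run.foldl pvStepA (d, c) = (d, c ++ run.flatMap PySem.Int.toChars) := by
  induction run generalizing c with
  | nil => simp
  | cons y t ih =>
    have hy : y ≠ -1 := h y (by simp)
    simp only [List.foldl_cons, pvStepA, if_neg hy]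
    rw [ih (c ++ PySem.Int.toChars y) (fun z hz => h z (by simp [hz]))]
    simp

theorem pv_dropWhile_head_false {p : Int → Bool} {t : List Int} {y : Int} {r : List Int}
    (h : t.dropWhile p = y :: r) : p y = false := by
  induction t with
  | nil => simp at h
  | cons a s ih =>
    rw [List.dropWhile_cons] at h
    by_cases ha : p a = true
    · rw [if_pos ha] at h; exact ih h
    · rw [if_neg ha] at h
      cases h
      simpa using ha

theorem pv_main : ∀ (n : Nat) (l : List Int), l.length ≤ n →
    pvFinishA (l.foldl pvStepA ([], [])) = pvAltGo l := by
  intro n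
  induction n with
  | zero =>
    intro l h
    have : l = [] := List.length_eq_zero_iff.mp (Nat.le_zero.mp h)
    subst this; simp [pvFinishA, pvAltGo]
  | succ n ih =>
    intro l hlen
    match l with
    | [] => simp [pvFinishA, pvAltGo]
    | x :: t =>
      by_cases hx : x = -1
      · subst hx
        have h1 : pvStepA ([], []) (-1) = ([], []) := by simp [pvStepA]
        rw [pvAltGo, dif_pos rfl, List.foldl_cons, h1]
        exact ih t (by simpa using Nat.lt_succ_iff.mp (by simpa using hlen))
      · -- split t into the rest of the run and the remainder
        set p : Int → Bool := fun y => y ≠ -1 with hp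
        have hpx : p x = true := by simp [hp, hx]
        have htw : (x :: t).takeWhile p = x :: t.takeWhile p := by
          rw [List.takeWhile_cons, if_pos hpx]
        have hdw : (x :: t).dropWhile p = t.dropWhile p := by
          rw [List.dropWhile_cons, if_pos hpx]
        have hsplit : t.takeWhile p ++ t.dropWhile p = t := List.takeWhile_append_dropWhile
        set bits : List Char := ((x :: t).takeWhile p).flatMap PySem.Int.toChars with hbits
        have hbits' : bits = PySem.Int.toChars x ++ (t.takeWhile p).flatMap PySem.Int.toChars := by
          rw [hbits, htw]; simp
        have hbne : bits ≠ [] := by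
          rw [hbits']
          intro h
          exact pv_toChars_ne_nil x (List.append_eq_nil_iff.mp h).1
        have hrunmem : ∀ y ∈ t.takeWhile p, y ≠ -1 := by
          intro y hy
          have := List.mem_takeWhile_imp hy
          simpa [hp] using this
        have hfold1 : (x :: t).foldl pvStepA ([], []) =
            (t.dropWhile p).foldl pvStepA ([], bits) := by
          rw [List.foldl_cons]
          have hstep : pvStepA ([], []) x = ([], PySem.Int.toChars x) := by
            simp [pvStepA, hx]
          rw [hstep]
          conv_lhs => rw [← hsplit]
          rw [List.foldl_append, pv_foldl_run _ _ _ hrunmem]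
          rw [hbits']
        rw [pvAltGo, dif_neg hx, ← hp, hdw, ← hbits, hfold1]
        -- now case on the remainder
        cases hrest : t.dropWhile p with
        | nil =>
          simp [pvFinishA, hbne, pvAltGo]
        | cons y r =>
          have hy : y = -1 := by
            have := pv_dropWhile_head_false hrest
            simpa [hp] using this
          subst hy
          have hstep2 : pvStepA ([], bits) (-1) = ([pvChr bits], []) := by
            simp [pvStepA, hbne]
          rw [List.foldl_cons, hstep2]
          have hshift := pv_foldl_shift r [pvChr bits] ([], [])
          simp only [List.append_nil] at hshift
          rw [hshift]
          have hfin := pv_finishA_shift [pvChr bits] (r.foldl pvStepA ([], []))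
          rw [← Prod.mk.eta (p := r.foldl pvStepA ([], []))] at hfin ⊢
          rw [hfin]
          have hrlen : r.length ≤ n := by
            have h1 : (t.dropWhile p).length ≤ t.length := List.length_dropWhile_le p t
            rw [hrest] at h1
            have h2 : t.length ≤ n := Nat.lt_succ_iff.mp (by simpa using hlen)
            simp at h1
            omega
          rw [ih r hrlen, pvAltGo, dif_pos rfl]
          rfl

-- ===== VERDICT (by name: the statement is the Claim_ definition above) =====
theorem encoded_array_to_string_spec : Claim_equal_encoded_array_to_string := by
  intro l _ _
  unfold Spec_encoded_array_to_string encoded_array_to_string encoded_array_to_string_alt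
  rw [PySem.Chars.join_nil_singletons, pv_main l.length l (Nat.le_refl _)]
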